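-- pv_equiv track=rewrite | github.com/shatianming5/open-problem-atlas | verifiers/checkers/math/rysers_checker.py | _has_transversal
-- ===== SOURCE A (Python) =====
-- def _has_transversal(square: list[list[int]], n: int) -> bool:
--     """Check if Latin square has a transversal."""
--     def bt(row: int, used_cols: int, used_syms: int) -> bool:
--         if row == n:
--             return True
--         for col in range(n):
--             if used_cols & (1 << col):
--                 continue
--             sym = square[row][col]
--             if used_syms & (1 << sym):
--                 continue
--             if bt(row + 1, used_cols | (1 << col), used_syms | (1 << sym)):
--                 return True
--         return False
--     return bt(0, 0, 0)
-- ===== SOURCE B (Python) =====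
-- def _has_transversal(square: list[list[int]], n: int) -> bool:
--     """Layered DP over (used-columns, used-symbols) mask pairs instead of DFS."""
--     states = {(0, 0)}
--     row = 0
--     while row < n:
--         nxt = set()
--         for uc, us in states:
--             for col in range(n):
--                 if uc & (1 << col):
--                     continue
--                 sym = square[row][col]
--                 if us & (1 << sym):
--                     continue
--                 nxt.add((uc | (1 << col), us | (1 << sym)))
--         if not nxt:
--             return False
--         states = nxt
--         row += 1
--     return row == n
-- ===== Notes on version B (the rewrite author's own statement) =====
-- stated objective: alternative
-- what changed: Replaces A's depth-first backtracking recursion by a row-by-row breadth-first dynamic program that carries the set of reachable (used-columns, used-symbols) bitmask pairs through the rows.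
-- outside the precondition, e.g. on _has_transversal([[0, 9, 9], [9, 1, -1], [9, 9, 2]], 3): A returns True, B raises ValueError
import Mathlib
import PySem

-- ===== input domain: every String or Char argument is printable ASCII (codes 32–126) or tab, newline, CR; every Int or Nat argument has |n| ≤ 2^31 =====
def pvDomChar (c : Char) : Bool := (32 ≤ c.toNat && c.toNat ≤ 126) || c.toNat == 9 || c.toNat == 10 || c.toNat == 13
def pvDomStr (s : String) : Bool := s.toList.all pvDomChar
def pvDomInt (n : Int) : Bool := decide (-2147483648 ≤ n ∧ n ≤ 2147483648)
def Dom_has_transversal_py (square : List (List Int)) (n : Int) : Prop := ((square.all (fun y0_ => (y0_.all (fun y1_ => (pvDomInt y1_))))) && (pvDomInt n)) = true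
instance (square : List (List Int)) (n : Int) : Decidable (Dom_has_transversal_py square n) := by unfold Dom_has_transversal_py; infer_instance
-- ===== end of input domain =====

-- B replaces A's depth-first backtracking recursion by a row-by-row breadth-first DP over the
-- set of reachable (used-columns, used-symbols) mask pairs; equivalence of the RETURN value is
-- proved on Pre_ (objective: alternative, not claimed faster).

-- ===== PORT A =====
-- Masks are kept as Nat and '1 << col' / '1 << sym' as '1 <<< ·.toNat': exact because Pre_
-- guarantees 0 ≤ sym for every reachable cell (Python raises ValueError on a negative shift)
-- and col ∈ range(n) is nonnegative. 'square[row][col]' is PySem.List.pyGet?; the 'none'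
-- (IndexError) branch yields false and is excluded by Pre_. The recursion bt is given fuel
-- (n - row).toNat, which never runs out when 0 ≤ n (part of Pre_).
def btA (square : List (List Int)) (n : Int) : Nat → Int → Nat → Nat → Bool
  | fuel, row, usedCols, usedSyms =>
    if row = n then true
    else
      match fuel with
      | 0 => false
      | fuel' + 1 =>
        (PySem.List.pyRange 0 n 1).any fun col =>
          if usedCols &&& (1 <<< col.toNat) ≠ 0 then false
          else
            match (PySem.List.pyGet? square row).bind (fun r => PySem.List.pyGet? r col) with
            | none => false
            | some sym =>
              if usedSyms &&& (1 <<< sym.toNat) ≠ 0 then false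
              else btA square n fuel' (row + 1) (usedCols ||| (1 <<< col.toNat)) (usedSyms ||| (1 <<< sym.toNat))

def has_transversal_py (square : List (List Int)) (n : Int) : Bool :=
  btA square n n.toNat 0 0 0

-- ===== PORT B =====
-- inner 'for col in range(n)' of Source B: add each admissible child state of p to the set acc
def succsB (square : List (List Int)) (n : Int) (row : Int) (p : Nat × Nat)
    (acc : PySem.Set (Nat × Nat)) : PySem.Set (Nat × Nat) :=
  (PySem.List.pyRange 0 n 1).foldl (fun acc col =>
    if p.1 &&& (1 <<< col.toNat) ≠ 0 then acc
    else
      match (PySem.List.pyGet? square row).bind (fun r => PySem.List.pyGet? r col) with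
      | none => acc
      | some sym =>
        if p.2 &&& (1 <<< sym.toNat) ≠ 0 then acc
        else PySem.Set.add acc (p.1 ||| (1 <<< col.toNat), p.2 ||| (1 <<< sym.toNat))) acc

-- outer 'while row < n' of Source B, one fuel tick per remaining row ((n - row).toNat iterations);
-- the final 'return row == n' is the base case
def loopB (square : List (List Int)) (n : Int) : Nat → Int → PySem.Set (Nat × Nat) → Bool
  | 0, row, _ => decide (row = n)
  | k + 1, row, states =>
    if states.foldl (fun acc p => succsB square n row p acc) PySem.Set.empty = [] then false
    else loopB square n k (row + 1) (states.foldl (fun acc p => succsB square n row p acc) PySem.Set.empty)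

def has_transversal_py_alt (square : List (List Int)) (n : Int) : Bool :=
  loopB square n n.toNat 0 (PySem.Set.ofList [((0 : Nat), (0 : Nat))])

-- ===== PRECONDITION & SPEC =====
-- Pre_ excludes squares whose leading n×n region is missing a cell or holds a negative
-- symbol — on most of those A raises IndexError / ValueError, though A can also return True
-- before ever touching the bad cell while B, which scans whole rows, would raise.
def Pre_has_transversal_py (square : List (List Int)) (n : Int) : Prop :=
  0 ≤ n → (n ≤ (square.length : Int) ∧
    ∀ r ∈ square.take n.toNat, n ≤ (r.length : Int) ∧ ∀ x ∈ r.take n.toNat, 0 ≤ x)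
instance (square : List (List Int)) (n : Int) : Decidable (Pre_has_transversal_py square n) := by
  unfold Pre_has_transversal_py; infer_instance

def pvWitness_has_transversal_py : List (List Int) × Int := ([[0, 1], [1, 0]], 2)

def Spec_has_transversal_py (square : List (List Int)) (n : Int) (out : Bool) : Prop := out = has_transversal_py_alt square n
instance (square : List (List Int)) (n : Int) (out : Bool) : Decidable (Spec_has_transversal_py square n out) := by unfold Spec_has_transversal_py; infer_instance

-- ===== CLAIM (what is proved, stated in full; the proofs are below) =====
def Claim_equal_has_transversal_py : Prop := ∀ (square : List (List Int)) (n : Int), Dom_has_transversal_py square n → Pre_has_transversal_py square n → Spec_has_transversal_py square n (has_transversal_py square n)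

-- ===== LEMMAS AND PROOFS =====

-- the common child-state function both ports compute cell by cell
def pvChild (square : List (List Int)) (row : Int) (p : Nat × Nat) (col : Int) :
    Option (Nat × Nat) :=
  if p.1 &&& (1 <<< col.toNat) ≠ 0 then none
  else
    match (PySem.List.pyGet? square row).bind (fun r => PySem.List.pyGet? r col) with
    | none => none
    | some sym =>
      if p.2 &&& (1 <<< sym.toNat) ≠ 0 then none
      else some (p.1 ||| (1 <<< col.toNat), p.2 ||| (1 <<< sym.toNat))

-- Source B's inner column loop is the "add the child state if any" fold of pvChild
lemma succsB_body_eq (square : List (List Int)) (row : Int) (p : Nat × Nat) :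
    (fun (acc : PySem.Set (Nat × Nat)) (col : Int) =>
      if p.1 &&& (1 <<< col.toNat) ≠ 0 then acc
      else
        match (PySem.List.pyGet? square row).bind (fun r => PySem.List.pyGet? r col) with
        | none => acc
        | some sym =>
          if p.2 &&& (1 <<< sym.toNat) ≠ 0 then acc
          else PySem.Set.add acc (p.1 ||| (1 <<< col.toNat), p.2 ||| (1 <<< sym.toNat)))
    = (fun (acc : PySem.Set (Nat × Nat)) (col : Int) =>
        match pvChild square row p col with
        | none => acc
        | some r => PySem.Set.add acc r) := by
  funext acc col
  unfold pvChild
  by_cases h1 : p.1 &&& (1 <<< col.toNat) ≠ 0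
  · simp [h1]
  · cases hlook : (PySem.List.pyGet? square row).bind (fun r => PySem.List.pyGet? r col) with
    | none => simp [h1]
    | some sym =>
      by_cases h2 : p.2 &&& (1 <<< sym.toNat) ≠ 0
      · simp [h1, h2]
      · simp [h1, h2]

lemma mem_foldl_child (g : Int → Option (Nat × Nat)) :
    ∀ (l : List Int) (acc : PySem.Set (Nat × Nat)) (q : Nat × Nat),
      (q ∈ l.foldl (fun acc col =>
          match g col with
          | none => acc
          | some r => PySem.Set.add acc r) acc)
      ↔ q ∈ acc ∨ ∃ col ∈ l, g col = some q := by
  intro l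
  induction l with
  | nil => simp
  | cons c t ih =>
    intro acc q
    rw [List.foldl_cons, ih]
    rw [List.exists_mem_cons_iff]
    cases hc : g c with
    | none => simp
    | some r =>
      simp only [PySem.Set.mem_add, Option.some_inj]
      constructor
      · rintro ((h | h) | h)
        · exact Or.inl h
        · exact Or.inr (Or.inl h.symm)
        · exact Or.inr (Or.inr h)
      · rintro (h | h | h)
        · exact Or.inl (Or.inl h)
        · exact Or.inl (Or.inr h.symm)
        · exact Or.inr h

lemma mem_succsB (square : List (List Int)) (n row : Int) (p : Nat × Nat)
    (acc : PySem.Set (Nat × Nat)) (q : Nat × Nat) :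
    q ∈ succsB square n row p acc
      ↔ q ∈ acc ∨ ∃ col ∈ PySem.List.pyRange 0 n 1, pvChild square row p col = some q := by
  unfold succsB
  rw [succsB_body_eq square row p, mem_foldl_child]

lemma mem_states_fold (square : List (List Int)) (n row : Int) :
    ∀ (states : List (Nat × Nat)) (acc : PySem.Set (Nat × Nat)) (q : Nat × Nat),
      (q ∈ states.foldl (fun acc p => succsB square n row p acc) acc)
      ↔ q ∈ acc ∨ ∃ p ∈ states, ∃ col ∈ PySem.List.pyRange 0 n 1,
          pvChild square row p col = some q := by
  intro states
  induction states with
  | nil => simp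
  | cons s t ih =>
    intro acc q
    rw [List.foldl_cons, ih, mem_succsB, List.exists_mem_cons_iff]
    exact or_assoc

lemma btA_succ (square : List (List Int)) (n : Int) (k : Nat) (row : Int) (uc us : Nat)
    (hrow : row ≠ n) :
    btA square n (k + 1) row uc us =
      (PySem.List.pyRange 0 n 1).any (fun col =>
        match pvChild square row (uc, us) col with
        | none => false
        | some q => btA square n k (row + 1) q.1 q.2) := by
  rw [btA]
  simp only [hrow, if_false]
  apply PySem.List.any_congr_mem
  intro col _
  unfold pvChild
  by_cases h1 : uc &&& (1 <<< col.toNat) ≠ 0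
  · simp [h1]
  · cases hlook : (PySem.List.pyGet? square row).bind (fun r => PySem.List.pyGet? r col) with
    | none => simp [h1]
    | some sym =>
      by_cases h2 : us &&& (1 <<< sym.toNat) ≠ 0
      · simp [h1, h2]
      · simp [h1, h2]

lemma loopB_iff (square : List (List Int)) (n : Int) :
    ∀ (k : Nat) (row : Int) (states : PySem.Set (Nat × Nat)),
      states ≠ [] → row + (k : Int) = n →
      (loopB square n k row states = true ↔
        ∃ p ∈ states, btA square n k row p.1 p.2 = true) := by
  intro k
  induction k with
  | zero =>
    intro row states hne hinv
    have hrow : row = n := by simpa using hinv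
    rcases List.exists_mem_of_ne_nil states hne with ⟨p, hp⟩
    subst hrow
    rw [loopB]
    constructor
    · intro _
      exact ⟨p, hp, by simp [btA]⟩
    · intro _; simp
  | succ k ih =>
    intro row states hne hinv
    have hrow : row ≠ n := by intro h; omega
    rw [loopB]
    have hmem : ∀ q : Nat × Nat,
        q ∈ states.foldl (fun acc p => succsB square n row p acc) PySem.Set.empty ↔
          ∃ p ∈ states, ∃ col ∈ PySem.List.pyRange 0 n 1,
            pvChild square row p col = some q := by
      intro q
      rw [mem_states_fold]
      simp [PySem.Set.empty]
    have hR : (∃ p ∈ states, btA square n (k + 1) row p.1 p.2 = true) ↔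
        (∃ q ∈ states.foldl (fun acc p => succsB square n row p acc) PySem.Set.empty,
          btA square n k (row + 1) q.1 q.2 = true) := by
      constructor
      · rintro ⟨p, hp, hbt⟩
        rw [btA_succ square n k row p.1 p.2 hrow] at hbt
        rcases List.any_eq_true.1 hbt with ⟨col, hcol, hbody⟩
        cases hc : pvChild square row (p.1, p.2) col with
        | none => simp [hc] at hbody
        | some q =>
          refine ⟨q, (hmem q).2 ⟨p, hp, col, hcol, hc⟩, ?_⟩
          simpa [hc] using hbody
      · rintro ⟨q, hq, hbt⟩
        rcases (hmem q).1 hq with ⟨p, hp, col, hcol, hc⟩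
        refine ⟨p, hp, ?_⟩
        rw [btA_succ square n k row p.1 p.2 hrow]
        exact List.any_eq_true.2 ⟨col, hcol, by simp [hc, hbt]⟩
    by_cases hemp :
        states.foldl (fun acc p => succsB square n row p acc) PySem.Set.empty = []
    · rw [if_pos hemp]
      constructor
      · intro h; cases h
      · intro h
        rcases hR.1 h with ⟨q, hq, _⟩
        rw [hemp] at hq; cases hq
    · rw [if_neg hemp]
      rw [ih (row + 1) (states.foldl (fun acc p => succsB square n row p acc) PySem.Set.empty)
        hemp (by omega)]
      exact hR.symm

-- ===== VERDICT (by name: the statement is the Claim_ definition above) =====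
theorem has_transversal_py_spec : Claim_equal_has_transversal_py := by
  intro square n _hdom _hpre
  unfold Spec_has_transversal_py has_transversal_py has_transversal_py_alt
  by_cases hn : (0 : Int) ≤ n
  case neg =>
    have hne : (0 : Int) ≠ n := by omega
    have h0 : n.toNat = 0 := by omega
    rw [h0, btA, loopB]
    simp [hne]
  have hinv : (0 : Int) + (n.toNat : Int) = n := by omega
  have h := loopB_iff square n n.toNat 0 (PySem.Set.ofList [((0 : Nat), (0 : Nat))])
    (by decide) hinv
  have hset : (PySem.Set.ofList [((0 : Nat), (0 : Nat))] : List (Nat × Nat)) =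
      [((0 : Nat), (0 : Nat))] := by decide
  rw [hset] at h
  simp only [List.mem_singleton] at h
  cases hA : btA square n n.toNat 0 0 0 with
  | false =>
    cases hB : loopB square n n.toNat 0 (PySem.Set.ofList [((0 : Nat), (0 : Nat))]) with
    | false => rfl
    | true =>
      exfalso
      rcases h.1 hB with ⟨p, hp, hbt⟩
      rw [hp, hA] at hbt
      cases hbt
  | true =>
    exact (h.2 ⟨((0 : Nat), (0 : Nat)), rfl, hA⟩).symm
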